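-- pv_equiv track=rewrite | github.com/abdulaleem123/livekit-sms-agent | prompts.py | format_for_voice
-- ===== SOURCE A (Python) =====
-- def format_for_voice(text: str) -> str:
--     """
--     Format text for voice delivery (calls)
--     """
--     if not text:
--         return ""
--
--     formatted = text.strip()
--
--     # Remove markdown
--     formatted = formatted.replace("**", "").replace("*", "")
--     formatted = formatted.replace("```", "").replace("`", "")
--
--     # Replace symbols with words for better voice synthesis
--     replacements = {
--         "&": "and",
--         "@": "at",
--         "#": "number",
--         "%": "percent",
--         "$": "dollars",
--         "+": "plus",
--         "=": "equals",
--         "<": "less than",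
--         ">": "greater than"
--     }
--
--     for symbol, word in replacements.items():
--         formatted = formatted.replace(symbol, f" {word} ")
--
--     # Clean up extra spaces
--     formatted = " ".join(formatted.split())
--
--     return formatted
-- ===== SOURCE B (Python) =====
-- def format_for_voice(text: str) -> str:
--     """
--     Format text for voice delivery (calls)
--     """
--     if not text:
--         return ""
--
--     words = {
--         "&": "and",
--         "@": "at",
--         "#": "number",
--         "%": "percent",
--         "$": "dollars",
--         "+": "plus",
--         "=": "equals",
--         "<": "less than",
--         ">": "greater than",
--     }
--
--     buf = []
--     for ch in text.strip():
--         if ch in ("*", "`"):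
--             continue
--         w = words.get(ch)
--         buf.append(ch if w is None else f" {w} ")
--
--     return " ".join("".join(buf).split())
-- ===== Notes on version B (the rewrite author's own statement) =====
-- stated objective: simpler
-- what changed: Replaced A's 13 sequential full-string replace passes with a single character scan using one symbol-to-word dict lookup, followed by the same split/join whitespace collapse.
import Mathlib
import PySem

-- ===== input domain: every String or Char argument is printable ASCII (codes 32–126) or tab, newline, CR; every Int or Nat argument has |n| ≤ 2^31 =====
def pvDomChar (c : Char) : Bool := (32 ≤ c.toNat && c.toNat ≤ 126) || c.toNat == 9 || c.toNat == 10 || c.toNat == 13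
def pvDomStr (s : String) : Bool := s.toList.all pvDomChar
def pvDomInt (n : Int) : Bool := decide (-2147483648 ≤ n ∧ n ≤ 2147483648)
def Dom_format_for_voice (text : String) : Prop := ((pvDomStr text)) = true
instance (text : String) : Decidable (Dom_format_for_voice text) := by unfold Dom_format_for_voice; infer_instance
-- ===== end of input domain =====

-- B replaces A's 13 sequential full-string replace passes by one character scan with a
-- symbol→word dict lookup (objective: simpler).

-- ===== PORT A =====
def format_for_voice (text : String) : String :=
  if text = "" then ""
  else
    let formatted := PySem.Str.strip text
    -- remove markdown
    let formatted := PySem.Str.replace (PySem.Str.replace formatted "**" "") "*" ""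
    let formatted := PySem.Str.replace (PySem.Str.replace formatted "```" "") "`" ""
    -- replace symbols with words
    let replacements : List (String × String) :=
      [("&", "and"), ("@", "at"), ("#", "number"), ("%", "percent"), ("$", "dollars"),
       ("+", "plus"), ("=", "equals"), ("<", "less than"), (">", "greater than")]
    let formatted := replacements.foldl
      (fun acc p => PySem.Str.replace acc p.1 (" " ++ p.2 ++ " ")) formatted
    -- clean up extra spaces
    PySem.Str.join " " (PySem.Str.split₀ formatted)

-- ===== PORT B =====
-- dict[str,str] ported as an association list (insertion order, first-match lookup)
def pvWords : List (Char × String) :=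
  [('&', "and"), ('@', "at"), ('#', "number"), ('%', "percent"), ('$', "dollars"),
   ('+', "plus"), ('=', "equals"), ('<', "less than"), ('>', "greater than")]

def format_for_voice_alt (text : String) : String :=
  if text = "" then ""
  else
    let buf := (PySem.Str.strip text).toList.foldl
      (fun acc c =>
        if c = '*' ∨ c = '`' then acc
        else
          match List.lookup c pvWords with
          | some w => acc ++ (" " ++ w ++ " ").toList
          | none => acc ++ [c]) ([] : List Char)
    PySem.Str.join " " (PySem.Str.split₀ (String.ofList buf))

-- ===== PRECONDITION & SPEC =====
def Spec_format_for_voice (text : String) (out : String) : Prop := out = format_for_voice_alt text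
instance (text : String) (out : String) : Decidable (Spec_format_for_voice text out) := by unfold Spec_format_for_voice; infer_instance

-- ===== CLAIM (what is proved, stated in full; the proofs are below) =====
def Claim_equal_format_for_voice : Prop := ∀ (text : String), Dom_format_for_voice text → Spec_format_for_voice text (format_for_voice text)

-- ===== LEMMAS AND PROOFS =====

-- replace with a one-character pattern is a flatMap
theorem go_single (a : Char) (w : List Char) :
    ∀ (fuel : Nat) (l acc : List Char), l.length ≤ fuel →
      PySem.Chars.replace.go [a] w fuel l acc
        = acc.reverse ++ l.flatMap (fun c => if c = a then w else [c]) := by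
  intro fuel
  induction fuel with
  | zero => intro l acc h
            have : l = [] := List.length_eq_zero_iff.mp (Nat.le_zero.mp h)
            subst this; simp [PySem.Chars.replace.go]
  | succ n ih =>
    intro l acc h
    cases l with
    | nil => simp [PySem.Chars.replace.go]
    | cons c t =>
      rw [PySem.Chars.replace.go]
      split
      · rename_i hpre
        have hca : c = a := by
          obtain ⟨r, hr⟩ := List.isPrefixOf_iff_prefix.mp hpre
          cases hr; rfl
        rw [ih _ _ (by simpa using Nat.le_of_succ_le_succ h)]
        simp [hca]
      · rename_i hpre
        have hca : ¬ c = a := by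
          intro hc; exact hpre (by simp [hc, List.isPrefixOf])
        rw [ih _ _ (by simpa using Nat.le_of_succ_le_succ h)]
        simp [hca]

theorem replace_single (a : Char) (w s : List Char) :
    PySem.Chars.replace s [a] w = s.flatMap (fun c => if c = a then w else [c]) := by
  rw [PySem.Chars.replace]
  simp [go_single a w s.length s [] le_rfl]

-- deleting a pattern whose characters a filter drops anyway commutes with that filter
theorem go_filter (p : Char → Bool) (old : List Char)
    (h : ∀ c ∈ old, p c = false) :
    ∀ (fuel : Nat) (l acc : List Char),
      (PySem.Chars.replace.go old [] fuel l acc).filter p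
        = acc.reverse.filter p ++ l.filter p := by
  intro fuel
  induction fuel with
  | zero => intro l acc; simp [PySem.Chars.replace.go]
  | succ n ih =>
    intro l acc
    cases l with
    | nil => simp [PySem.Chars.replace.go]
    | cons c t =>
      rw [PySem.Chars.replace.go]
      split
      · rename_i hpre
        rw [ih]
        have hdrop : (c :: t).filter p
            = ((c :: t).take old.length).filter p ++ ((c :: t).drop old.length).filter p := by
          rw [← List.filter_append, List.take_append_drop]
        have htake : ((c :: t).take old.length).filter p = [] := by
          obtain ⟨r, hr⟩ := List.isPrefixOf_iff_prefix.mp hpre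
          have hto : (c :: t).take old.length = old := by
            rw [← hr, List.take_left]
          rw [hto, List.filter_eq_nil_iff]
          intro a ha; simp [h a ha]
        simp [hdrop, htake]
      · rw [ih]
        simp [List.filter_cons]
        split <;> simp

theorem filter_replace_del (p : Char → Bool) (old s : List Char) (hne : old ≠ [])
    (h : ∀ c ∈ old, p c = false) :
    (PySem.Chars.replace s old []).filter p = s.filter p := by
  rw [PySem.Chars.replace]
  simp [List.isEmpty_iff, hne, go_filter p old h]

-- a flatMap that deletes exactly the chars a predicate rejects is filter-then-flatMap
theorem flatMap_guard (p : Char → Bool) (f : Char → List Char) (s : List Char) :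
    s.flatMap (fun c => if p c then f c else []) = (s.filter p).flatMap f := by
  induction s with
  | nil => rfl
  | cons c t ih =>
    by_cases hc : p c = true <;> simp [hc, ih]

-- the composed per-character effect of A's nine symbol replaces
def pvG (c : Char) : List Char :=
  if c = '&' then " and ".toList else if c = '@' then " at ".toList
  else if c = '#' then " number ".toList else if c = '%' then " percent ".toList
  else if c = '$' then " dollars ".toList else if c = '+' then " plus ".toList
  else if c = '=' then " equals ".toList else if c = '<' then " less than ".toList
  else if c = '>' then " greater than ".toList else [c]

theorem chain_nine (u : List Char) :
    PySem.Chars.replace (PySem.Chars.replace (PySem.Chars.replace (PySem.Chars.replace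
      (PySem.Chars.replace (PySem.Chars.replace (PySem.Chars.replace (PySem.Chars.replace
        (PySem.Chars.replace u ['&'] " and ".toList) ['@'] " at ".toList)
        ['#'] " number ".toList) ['%'] " percent ".toList) ['$'] " dollars ".toList)
        ['+'] " plus ".toList) ['='] " equals ".toList) ['<'] " less than ".toList)
        ['>'] " greater than ".toList
      = u.flatMap pvG := by
  simp only [replace_single, List.flatMap_assoc]
  apply List.flatMap_congr
  intro c _
  by_cases h1 : c = '&'; · subst h1; decide
  by_cases h2 : c = '@'; · subst h2; decide
  by_cases h3 : c = '#'; · subst h3; decide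
  by_cases h4 : c = '%'; · subst h4; decide
  by_cases h5 : c = '$'; · subst h5; decide
  by_cases h6 : c = '+'; · subst h6; decide
  by_cases h7 : c = '='; · subst h7; decide
  by_cases h8 : c = '<'; · subst h8; decide
  by_cases h9 : c = '>'; · subst h9; decide
  simp [pvG, h1, h2, h3, h4, h5, h6, h7, h8, h9]

-- B's per-character function, written with the filter guard
theorem b_step_eq (c : Char) :
    (if c = '*' ∨ c = '`' then ([] : List Char)
     else match List.lookup c pvWords with
          | some w => (" " ++ w ++ " ").toList
          | none => [c])
      = (if !(c == '*') && !(c == '`') then pvG c else []) := by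
  by_cases h1 : c = '*'; · subst h1; decide
  by_cases h2 : c = '`'; · subst h2; decide
  by_cases h3 : c = '&'; · subst h3; decide
  by_cases h4 : c = '@'; · subst h4; decide
  by_cases h5 : c = '#'; · subst h5; decide
  by_cases h6 : c = '%'; · subst h6; decide
  by_cases h7 : c = '$'; · subst h7; decide
  by_cases h8 : c = '+'; · subst h8; decide
  by_cases h9 : c = '='; · subst h9; decide
  by_cases h10 : c = '<'; · subst h10; decide
  by_cases h11 : c = '>'; · subst h11; decide
  have hget : List.lookup c pvWords = none := by
    simp [pvWords, h3, h4, h5, h6, h7, h8, h9, h10, h11]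
  simp [pvG, hget, h1, h2, h3, h4, h5, h6, h7, h8, h9, h10, h11]


theorem replace_del (a : Char) (s : List Char) :
    PySem.Chars.replace s [a] [] = s.filter (fun c => !(c == a)) := by
  rw [replace_single]
  induction s with
  | nil => rfl
  | cons c t ih => by_cases h : c = a <;> simp [h, ih]

-- B's fold, rewritten as filter-then-flatMap
theorem b_fold (s : List Char) :
    s.foldl
      (fun acc c =>
        if c = '*' ∨ c = '`' then acc
        else
          match List.lookup c pvWords with
          | some w => acc ++ (" " ++ w ++ " ").toList
          | none => acc ++ [c])
      []
      = (s.filter (fun c => !(c == '*') && !(c == '`'))).flatMap pvG := by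
  rw [← flatMap_guard]
  have hfold : ∀ (u acc : List Char),
      u.foldl
        (fun acc c =>
          if c = '*' ∨ c = '`' then acc
          else
            match List.lookup c pvWords with
            | some w => acc ++ (" " ++ w ++ " ").toList
            | none => acc ++ [c])
        acc
        = acc ++ u.flatMap (fun c => if !(c == '*') && !(c == '`') then pvG c else []) := by
    intro u
    induction u with
    | nil => simp
    | cons c t ih =>
      intro acc
      rw [List.foldl_cons, ih, List.flatMap_cons, ← List.append_assoc]
      congr 1
      rw [← b_step_eq]
      by_cases h : c = '*' ∨ c = '`'
      · simp [h]
      · simp only [h, if_false]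
        cases List.lookup c pvWords <;> simp
  simpa using hfold s []

theorem core (s : List Char) :
    PySem.Chars.replace
      (PySem.Chars.replace
        (PySem.Chars.replace
          (PySem.Chars.replace
            (PySem.Chars.replace
              (PySem.Chars.replace
                (PySem.Chars.replace
                  (PySem.Chars.replace
                    (PySem.Chars.replace
                      (PySem.Chars.replace
                        (PySem.Chars.replace
                          (PySem.Chars.replace (PySem.Chars.replace s "**".toList "".toList)
                            "*".toList "".toList)
                          "```".toList "".toList)
                        "`".toList "".toList)
                      "&".toList (" " ++ "and" ++ " ").toList)
                    "@".toList (" " ++ "at" ++ " ").toList)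
                  "#".toList (" " ++ "number" ++ " ").toList)
                "%".toList (" " ++ "percent" ++ " ").toList)
              "$".toList (" " ++ "dollars" ++ " ").toList)
            "+".toList (" " ++ "plus" ++ " ").toList)
          "=".toList (" " ++ "equals" ++ " ").toList)
        "<".toList (" " ++ "less than" ++ " ").toList)
      ">".toList (" " ++ "greater than" ++ " ").toList
      = s.foldl
          (fun acc c =>
            if c = '*' ∨ c = '`' then acc
            else
              match List.lookup c pvWords with
              | some w => acc ++ (" " ++ w ++ " ").toList
              | none => acc ++ [c])
          [] := by
  rw [b_fold]
  have h1 : "&".toList = ['&'] := by simp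
  have h2 : "@".toList = ['@'] := by simp
  have h3 : "#".toList = ['#'] := by simp
  have h4 : "%".toList = ['%'] := by simp
  have h5 : "$".toList = ['$'] := by simp
  have h6 : "+".toList = ['+'] := by simp
  have h7 : "=".toList = ['='] := by simp
  have h8 : "<".toList = ['<'] := by simp
  have h9 : ">".toList = ['>'] := by simp
  have w1 : (" " ++ "and" ++ " ").toList = " and ".toList := by simp
  have w2 : (" " ++ "at" ++ " ").toList = " at ".toList := by simp
  have w3 : (" " ++ "number" ++ " ").toList = " number ".toList := by simp
  have w4 : (" " ++ "percent" ++ " ").toList = " percent ".toList := by simp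
  have w5 : (" " ++ "dollars" ++ " ").toList = " dollars ".toList := by simp
  have w6 : (" " ++ "plus" ++ " ").toList = " plus ".toList := by simp
  have w7 : (" " ++ "equals" ++ " ").toList = " equals ".toList := by simp
  have w8 : (" " ++ "less than" ++ " ").toList = " less than ".toList := by simp
  have w9 : (" " ++ "greater than" ++ " ").toList = " greater than ".toList := by simp
  have m1 : "**".toList = ['*','*'] := by simp
  have m2 : "*".toList = ['*'] := by simp
  have m3 : "```".toList = ['`','`','`'] := by simp
  have m4 : "`".toList = ['`'] := by simp
  have m0 : "".toList = ([] : List Char) := by simp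
  rw [m0, m1, m2, m3, m4, h1, h2, h3, h4, h5, h6, h7, h8, h9,
      w1, w2, w3, w4, w5, w6, w7, w8, w9]
  rw [replace_del '*', filter_replace_del _ _ _ (by simp) (by simp),
      replace_del '`', filter_replace_del _ _ _ (by simp) (by simp)]
  rw [chain_nine]
  congr 1
  rw [List.filter_filter]
  exact List.filter_congr (fun c _ => Bool.and_comm _ _)

-- ===== VERDICT (by name: the statement is the Claim_ definition above) =====
theorem format_for_voice_spec : Claim_equal_format_for_voice := by
  intro text _
  unfold Spec_format_for_voice format_for_voice format_for_voice_alt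
  by_cases hempty : text = ""
  · simp [hempty]
  · simp only [hempty, ite_false]
    refine congrArg _ (congrArg _ (String.toList_injective ?_))
    simp only [List.foldl, PySem.Str.toList_replace, String.toList_ofList]
    exact core (PySem.Str.strip text).toList
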